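-- pv_equiv track=rewrite | github.com/MarkHumphries1988/Katas | src/herd_the_babies/herd_the_babies.py | herd_the_babies
-- ===== SOURCE A (Python) =====
-- def herd_the_babies(string):
--     herddict={}
--     herded=""
--     for character in string:
--         if character.upper() in herddict:
--             if character.islower():
--                 herddict[character.upper()][1]+=1
--             else:
--                 herddict[character.upper()][0]+=1
--         else:
--             if character.islower():
--                 herddict[character.upper()]=[0,1]
--             else:
--                 herddict[character.upper()]=[1,0]
--
--     dictkeys=list(herddict.keys())
--     dictkeys.sort()
--     sorted_herddict={letter:herddict[letter] for letter in dictkeys}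
--
--     for key in sorted_herddict:
--         herded+=key.upper()*sorted_herddict[key][0]+key.lower()*sorted_herddict[key][1]
--
--     return herded
--
--
--
--
--
--
--     pass
-- ===== SOURCE B (Python) =====
-- def herd_the_babies(string):
--     chars = sorted(string, key=str.upper)
--
--     def emit(cs):
--         if not cs:
--             return ""
--         k = cs[0].upper()
--         i = 0
--         lo = 0
--         while i < len(cs) and cs[i].upper() == k:
--             if cs[i].islower():
--                 lo += 1
--             i += 1
--         return k * (i - lo) + k.lower() * lo + emit(cs[i:])
--
--     return emit(chars)
-- ===== Notes on version B (the rewrite author's own statement) =====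
-- stated objective: alternative
-- what changed: A counts upper/lower occurrences per uppercase key in a dict, sorts the keys, rebuilds a sorted dict and concatenates per key; B instead sorts the characters by their uppercase form once and emits each contiguous group in a single scan, with no dict at all.
import Mathlib
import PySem

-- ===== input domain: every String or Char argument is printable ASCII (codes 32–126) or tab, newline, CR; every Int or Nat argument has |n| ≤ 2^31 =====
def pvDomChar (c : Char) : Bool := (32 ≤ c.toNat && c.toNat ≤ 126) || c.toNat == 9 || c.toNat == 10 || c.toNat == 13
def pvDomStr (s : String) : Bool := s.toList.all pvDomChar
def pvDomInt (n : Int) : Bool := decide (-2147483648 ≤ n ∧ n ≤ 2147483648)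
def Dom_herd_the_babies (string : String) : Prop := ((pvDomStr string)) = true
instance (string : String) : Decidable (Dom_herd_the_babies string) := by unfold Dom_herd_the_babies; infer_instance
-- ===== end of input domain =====

-- B replaces A's dict-counting + key-sort + dict-rebuild with sort-by-uppercase-key then one grouped scan (alternative decomposition, same result).


-- ===== PORT A =====
-- Python dict values are the two-element lists [hi, lo], ported as pairs (Int × Int);
-- the in-place 'herddict[k][i] += 1' becomes an insert that overwrites the value at k (keeps position).
def herdStep (d : PySem.Dict Char (Int × Int)) (c : Char) : PySem.Dict Char (Int × Int) :=
  if d.contains (PySem.Chars.upperChar c) then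
    if PySem.Chars.islower c then
      d.insert (PySem.Chars.upperChar c)
        ((d.getD (PySem.Chars.upperChar c) (0, 0)).1, (d.getD (PySem.Chars.upperChar c) (0, 0)).2 + 1)
    else
      d.insert (PySem.Chars.upperChar c)
        ((d.getD (PySem.Chars.upperChar c) (0, 0)).1 + 1, (d.getD (PySem.Chars.upperChar c) (0, 0)).2)
  else
    if PySem.Chars.islower c then d.insert (PySem.Chars.upperChar c) (0, 1)
    else d.insert (PySem.Chars.upperChar c) (1, 0)

def herd_the_babies (string : String) : String :=
  let herddict := string.toList.foldl herdStep PySem.Dict.empty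
  let dictkeys := PySem.List.sorted herddict.keys (fun x => x)
  -- {letter: herddict[letter] for letter in dictkeys}; every key is in herddict, so the getD default is unreachable
  let sorted_herddict :=
    dictkeys.foldl (fun d k => d.insert k (herddict.getD k ((0 : Int), (0 : Int)))) PySem.Dict.empty
  -- for key in sorted_herddict: herded += key.upper()*…[0] + key.lower()*…[1]
  let herded := sorted_herddict.keys.foldl (fun acc k =>
      acc ++ (PySem.List.pyRepeat [PySem.Chars.upperChar k] (sorted_herddict.getD k (0, 0)).1
           ++ PySem.List.pyRepeat [PySem.Chars.lowerChar k] (sorted_herddict.getD k (0, 0)).2)) []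
  String.ofList herded

-- ===== PORT B =====
-- Source B's emit: peel off the leading run of chars sharing the uppercase key, count its lowercase members, recurse on the rest.
def altEmit (cs : List Char) : List Char :=
  match cs with
  | [] => []
  | c :: rest =>
      let k := PySem.Chars.upperChar c
      let grp := (c :: rest).takeWhile (fun x => PySem.Chars.upperChar x == k)
      let lo := grp.countP (fun x => PySem.Chars.islower x)
      PySem.List.pyRepeat [k] ((grp.length : Int) - (lo : Int))
        ++ (PySem.List.pyRepeat [PySem.Chars.lowerChar k] (lo : Int)
        ++ altEmit ((c :: rest).drop grp.length))
termination_by cs.length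
decreasing_by
  simp only [List.takeWhile_cons, beq_self_eq_true, if_true, List.length_drop, List.length_cons]
  omega

def herd_the_babies_alt (string : String) : String :=
  String.ofList (altEmit (PySem.List.sorted string.toList (fun c => PySem.Chars.upperChar c)))

-- ===== PRECONDITION & SPEC =====
def Spec_herd_the_babies (string : String) (out : String) : Prop := out = herd_the_babies_alt string
instance (string : String) (out : String) : Decidable (Spec_herd_the_babies string out) := by unfold Spec_herd_the_babies; infer_instance

-- ===== CLAIM (what is proved, stated in full; the proofs are below) =====
def Claim_equal_herd_the_babies : Prop := ∀ (string : String), Dom_herd_the_babies string → Spec_herd_the_babies string (herd_the_babies string)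

-- ===== LEMMAS AND PROOFS =====

-- Canonical form both ports are reduced to: for each distinct uppercase key, in sorted order,
-- the non-lowercase count of copies of the key then the lowercase count of copies of its lowercase form.
def hbHi (cs : List Char) (k : Char) : Nat :=
  cs.countP (fun c => PySem.Chars.upperChar c == k && !PySem.Chars.islower c)
def hbLo (cs : List Char) (k : Char) : Nat :=
  cs.countP (fun c => PySem.Chars.upperChar c == k && PySem.Chars.islower c)
def hbBlock (cs : List Char) (k : Char) : List Char :=
  List.replicate (hbHi cs k) k ++ List.replicate (hbLo cs k) (PySem.Chars.lowerChar k)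
def hbCanon (cs : List Char) : List Char :=
  (PySem.List.sorted (PySem.List.dedup (cs.map PySem.Chars.upperChar)) (fun x => x)).flatMap (hbBlock cs)

theorem toNat_ofNat_valid (n : Nat) (h : n.isValidChar) : (Char.ofNat n).toNat = n := by
  simp only [Char.ofNat, dif_pos h, Char.ofNatAux, Char.toNat]; rfl

theorem upperChar_idem (c : Char) :
    PySem.Chars.upperChar (PySem.Chars.upperChar c) = PySem.Chars.upperChar c := by
  by_cases h : PySem.Chars.islower c
  · have hc : 97 ≤ c.toNat ∧ c.toNat ≤ 122 := by
      simp only [PySem.Chars.islower, Bool.and_eq_true, decide_eq_true_eq, Char.le_def] at h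
      exact ⟨h.1, h.2⟩
    have hval : (Char.ofNat (c.toNat - 32)).toNat = c.toNat - 32 :=
      toNat_ofNat_valid _ (Or.inl (by omega))
    have h2 : PySem.Chars.islower (Char.ofNat (c.toNat - 32)) = false := by
      simp only [PySem.Chars.islower, Bool.and_eq_false_iff, decide_eq_false_iff_not, Char.le_def]
      left; show ¬ (97 ≤ (Char.ofNat (c.toNat - 32)).toNat); omega
    simp [PySem.Chars.upperChar, h, h2]
  · simp [PySem.Chars.upperChar, h]

-- ---- A side ----

theorem herdStep_eq : herdStep = fun d c =>
    d.modify (PySem.Chars.upperChar c) (0, 0)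
      (fun p => if PySem.Chars.islower c then (p.1, p.2 + 1) else (p.1 + 1, p.2)) := by
  funext d c
  unfold herdStep PySem.Dict.modify
  by_cases hcont : d.contains (PySem.Chars.upperChar c)
  · by_cases hl : PySem.Chars.islower c <;> simp [hcont, hl]
  · by_cases hl : PySem.Chars.islower c <;>
      simp [hcont, hl, PySem.Dict.getD_of_not_contains _ _ (by simpa using hcont)]

theorem hbFold_getD_aux (cs : List Char) (d : PySem.Dict Char (Int × Int)) (k : Char) :
    (cs.foldl (fun d c => d.modify (PySem.Chars.upperChar c) (0, 0)
        (fun p => if PySem.Chars.islower c then (p.1, p.2 + 1) else (p.1 + 1, p.2))) d).getD k (0, 0)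
      = ((d.getD k (0, 0)).1 + (hbHi cs k : Int), (d.getD k (0, 0)).2 + (hbLo cs k : Int)) := by
  induction cs generalizing d with
  | nil => simp [hbHi, hbLo]
  | cons c t ih =>
      rw [List.foldl_cons, ih]
      show (((d.modify (PySem.Chars.upperChar c) (0, 0)
        (fun p => if PySem.Chars.islower c then (p.1, p.2 + 1) else (p.1 + 1, p.2))).getD k (0, 0)).1 + _, _) = _
      rw [PySem.Dict.getD_modify]
      by_cases hk : k = PySem.Chars.upperChar c
      · subst hk
        by_cases hl : PySem.Chars.islower c <;>
          simp [hbHi, hbLo, hl] <;> ring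
      · have hne : (PySem.Chars.upperChar c == k) = false := by
          simp; exact fun h => hk h.symm
        simp [if_neg hk, hbHi, hbLo, hne]

theorem hbFold_getD (cs : List Char) (d : PySem.Dict Char (Int × Int)) (k : Char) :
    (cs.foldl herdStep d).getD k (0, 0)
      = ((d.getD k (0, 0)).1 + (hbHi cs k : Int), (d.getD k (0, 0)).2 + (hbLo cs k : Int)) := by
  rw [herdStep_eq]; exact hbFold_getD_aux cs d k

theorem hbFold_keys (cs : List Char) :
    (cs.foldl herdStep PySem.Dict.empty).keys = PySem.List.dedup (cs.map PySem.Chars.upperChar) := by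
  rw [herdStep_eq, PySem.Dict.keys_foldl_modify_key]
  simp [PySem.Set.update_nil_left]

theorem herd_eq_canon (s : String) : herd_the_babies s = String.ofList (hbCanon s.toList) := by
  simp only [herd_the_babies]
  set cs := s.toList with hcs
  set herddict := cs.foldl herdStep PySem.Dict.empty with hd
  have hkeys : herddict.keys = PySem.List.dedup (cs.map PySem.Chars.upperChar) := hbFold_keys cs
  have hval : ∀ k, herddict.getD k (0, 0) = ((hbHi cs k : Int), (hbLo cs k : Int)) := by
    intro k; rw [hd, hbFold_getD]; simp [PySem.Dict.getD_empty]
  set dictkeys := PySem.List.sorted herddict.keys (fun x => x) with hdk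
  have hperm : dictkeys.Perm herddict.keys := PySem.List.sorted_perm _ _ false
  have hnodup : dictkeys.Nodup := by
    refine hperm.nodup_iff.mpr ?_
    rw [hkeys]; simpa using PySem.Set.nodup_ofList (cs.map PySem.Chars.upperChar)
  set shd := dictkeys.foldl (fun d k => d.insert k (herddict.getD k ((0 : Int), (0 : Int)))) PySem.Dict.empty with hshd
  have hitems : shd.items = dictkeys.map (fun k => (k, herddict.getD k (0, 0))) := by
    rw [hshd]
    have := PySem.Dict.items_foldl_insert_fresh (l := dictkeys) (k := fun x => x)
      (v := fun k => herddict.getD k ((0 : Int), (0 : Int))) (d := PySem.Dict.empty)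
      (by intro a _; simp [PySem.Dict.contains_empty]) (by simpa using hnodup)
    simpa using this
  have hskeys : shd.keys = dictkeys := by
    show shd.items.map (·.1) = dictkeys
    rw [hitems]; simp [Function.comp_def]
  have hsget : ∀ k ∈ dictkeys, shd.getD k (0, 0) = ((hbHi cs k : Int), (hbLo cs k : Int)) := by
    intro k hk
    rw [PySem.Dict.getD_of_mem_items shd (v := herddict.getD k (0, 0))
      (by rw [hitems]; exact List.mem_map.mpr ⟨k, hk, rfl⟩) (by rw [hskeys]; exact hnodup)]
    exact hval k
  have hupk : ∀ k ∈ dictkeys, PySem.Chars.upperChar k = k := by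
    intro k hk
    have hmemk : k ∈ herddict.keys := hperm.mem_iff.mp hk
    rw [hkeys] at hmemk
    have : k ∈ cs.map PySem.Chars.upperChar := by
      simpa [PySem.List.mem_dedup] using hmemk
    obtain ⟨c, _, rfl⟩ := List.mem_map.mp this
    exact upperChar_idem c
  rw [hskeys, PySem.List.foldl_append_eq_flatMap, List.nil_append]
  have hflat : dictkeys.flatMap (fun k =>
      PySem.List.pyRepeat [PySem.Chars.upperChar k] (shd.getD k (0, 0)).1
        ++ PySem.List.pyRepeat [PySem.Chars.lowerChar k] (shd.getD k (0, 0)).2)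
      = dictkeys.flatMap (hbBlock cs) := by
    simp only [List.flatMap_def]
    congr 1
    refine List.map_congr_left ?_
    intro k hk
    rw [hsget k hk, hupk k hk, hbBlock]
    simp [PySem.List.pyRepeat_singleton]
  rw [hflat]
  have hdkeq : dictkeys = PySem.List.sorted (PySem.List.dedup (cs.map PySem.Chars.upperChar)) (fun x => x) := by
    rw [hdk, hkeys]
  rw [hdkeq, hbCanon]

-- ---- B side ----

theorem ofList_all_eq {k : Char} (as : List Char) (hne : as ≠ []) (hall : ∀ x ∈ as, x = k) :
    PySem.Set.ofList as = [k] := by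
  induction as with
  | nil => exact absurd rfl hne
  | cons a t ih =>
      rw [PySem.Set.ofList_cons, hall a List.mem_cons_self]
      cases t with
      | nil => rfl
      | cons b t2 =>
          rw [ih (by simp) (fun x hx => hall x (List.mem_cons_of_mem _ hx))]
          simp [PySem.Set.discard]

theorem dedup_const_append {k : Char} (as l : List Char) (hne : as ≠ [])
    (hall : ∀ x ∈ as, x = k) (hk : k ∉ l) :
    PySem.List.dedup (as ++ l) = k :: PySem.List.dedup l := by
  simp only [PySem.List.dedup_eq_ofList, PySem.Set.ofList_append, ofList_all_eq as hne hall,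
    PySem.Set.update_eq_append_filter]
  have hfil : List.filter (fun y => !(PySem.Set.contains [k] y)) (PySem.Set.ofList l)
      = PySem.Set.ofList l := by
    rw [List.filter_eq_self]
    intro a ha
    have hmem : a ∈ l := (PySem.Set.mem_ofList _ _).mp ha
    have hak : a ≠ k := fun h => hk (h ▸ hmem)
    simp [PySem.Set.contains, hak]
  rw [hfil]
  rfl

theorem altEmit_sorted : ∀ (ss : List Char),
    ss.Pairwise (fun a b => PySem.Chars.upperChar a ≤ PySem.Chars.upperChar b) →
    altEmit ss = (PySem.List.dedup (ss.map PySem.Chars.upperChar)).flatMap (hbBlock ss) := by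
  have main : ∀ (n : Nat) (ss : List Char), ss.length ≤ n →
      ss.Pairwise (fun a b => PySem.Chars.upperChar a ≤ PySem.Chars.upperChar b) →
      altEmit ss = (PySem.List.dedup (ss.map PySem.Chars.upperChar)).flatMap (hbBlock ss) := by
    intro n
    induction n with
    | zero =>
        intro ss hlen _
        have : ss = [] := List.eq_nil_of_length_eq_zero (Nat.le_zero.mp hlen)
        subst this; simp [altEmit]
    | succ n ihn =>
        intro ss hlen h
        cases ss with
        | nil => simp [altEmit]
        | cons c rest =>
        set k := PySem.Chars.upperChar c with hk
        set p : Char → Bool := fun x => PySem.Chars.upperChar x == k with hp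
        set grp := (c :: rest).takeWhile p with hgrp
        set dr := (c :: rest).dropWhile p with hdr
        have hpc : p c = true := by simp [hp, hk]
        have hsplit : grp ++ dr = c :: rest := List.takeWhile_append_dropWhile
        have hdrop : (c :: rest).drop grp.length = dr := by
          conv_lhs => rw [← hsplit]
          exact List.drop_left
        have hgrpk : ∀ x ∈ grp, PySem.Chars.upperChar x = k := by
          intro x hx
          have := List.mem_takeWhile_imp hx
          simpa [hp] using this
        have hgrpne : grp ≠ [] := by
          rw [hgrp, List.takeWhile_cons, hpc]; simp
        have htail : ∀ x ∈ rest, k ≤ PySem.Chars.upperChar x := by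
          intro x hx; exact (List.pairwise_cons.mp h).1 x hx
        have hdrsub : dr.Sublist (c :: rest) := List.dropWhile_sublist p
        have hdrpair : dr.Pairwise (fun a b => PySem.Chars.upperChar a ≤ PySem.Chars.upperChar b) :=
          h.sublist hdrsub
        have hdrrest : dr.Sublist rest := by
          rw [hdr, List.dropWhile_cons_of_pos hpc]; exact List.dropWhile_sublist p
        have hlt : ∀ x ∈ dr, k < PySem.Chars.upperChar x := by
          intro x hx
          cases hdrC : dr with
          | nil => rw [hdrC] at hx; exact absurd hx (List.not_mem_nil)
          | cons b dt =>
              have hbfail : p b = false := by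
                have := List.head?_dropWhile_not p (c :: rest)
                rw [← hdr, hdrC] at this
                simpa using this
              have hbk : PySem.Chars.upperChar b ≠ k := by simpa [hp] using hbfail
              have hbk' : k < PySem.Chars.upperChar b := by
                have hbmem : b ∈ rest := hdrrest.mem (by rw [hdrC]; exact List.mem_cons_self)
                exact lt_of_le_of_ne (htail b hbmem) (Ne.symm hbk)
              rw [hdrC] at hx
              rcases List.mem_cons.mp hx with rfl | hx2
              · exact hbk'
              · have hble : PySem.Chars.upperChar b ≤ PySem.Chars.upperChar x := by
                  have hp2 := hdrpair
                  rw [hdrC] at hp2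
                  exact (List.pairwise_cons.mp hp2).1 x hx2
                exact lt_of_lt_of_le hbk' hble
        have hne : ∀ x ∈ dr, PySem.Chars.upperChar x ≠ k := fun x hx => (hlt x hx).ne'
        have hknotin : k ∉ dr.map PySem.Chars.upperChar := by
          intro hmem
          obtain ⟨x, hx, hxe⟩ := List.mem_map.mp hmem
          exact hne x hx hxe
        have hdedup : PySem.List.dedup ((c :: rest).map PySem.Chars.upperChar)
            = k :: PySem.List.dedup (dr.map PySem.Chars.upperChar) := by
          conv_lhs => rw [← hsplit, List.map_append]
          refine dedup_const_append _ _ ?_ ?_ hknotin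
          · simpa using hgrpne
          · intro x hx
            obtain ⟨y, hy, rfl⟩ := List.mem_map.mp hx
            exact hgrpk y hy
        have hcountHi : hbHi (c :: rest) k = grp.countP (fun x => !PySem.Chars.islower x) := by
          rw [hbHi, ← hsplit, List.countP_append]
          have h1 : grp.countP (fun c' => PySem.Chars.upperChar c' == k && !PySem.Chars.islower c')
              = grp.countP (fun x => !PySem.Chars.islower x) := by
            refine List.countP_congr ?_
            intro x hx; simp [hgrpk x hx]
          have h2 : dr.countP (fun c' => PySem.Chars.upperChar c' == k && !PySem.Chars.islower c') = 0 := by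
            rw [List.countP_eq_zero]
            intro x hx; simp [hne x hx]
          omega
        have hcountLo : hbLo (c :: rest) k = grp.countP (fun x => PySem.Chars.islower x) := by
          rw [hbLo, ← hsplit, List.countP_append]
          have h1 : grp.countP (fun c' => PySem.Chars.upperChar c' == k && PySem.Chars.islower c')
              = grp.countP (fun x => PySem.Chars.islower x) := by
            refine List.countP_congr ?_
            intro x hx; simp [hgrpk x hx]
          have h2 : dr.countP (fun c' => PySem.Chars.upperChar c' == k && PySem.Chars.islower c') = 0 := by
            rw [List.countP_eq_zero]
            intro x hx; simp [hne x hx]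
          omega
        have hcountOtherHi : ∀ k', k' ≠ k → hbHi (c :: rest) k' = hbHi dr k' := by
          intro k' hk'
          have hkk : (k == k') = false := by
            simpa using fun hcontr => hk' hcontr.symm
          rw [hbHi, hbHi, ← hsplit, List.countP_append]
          have hg : grp.countP (fun c' => PySem.Chars.upperChar c' == k' && !PySem.Chars.islower c') = 0 := by
            rw [List.countP_eq_zero]
            intro x hx; simp [hgrpk x hx, hkk]
          omega
        have hcountOtherLo : ∀ k', k' ≠ k → hbLo (c :: rest) k' = hbLo dr k' := by
          intro k' hk'
          have hkk : (k == k') = false := by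
            simpa using fun hcontr => hk' hcontr.symm
          rw [hbLo, hbLo, ← hsplit, List.countP_append]
          have hg : grp.countP (fun c' => PySem.Chars.upperChar c' == k' && PySem.Chars.islower c') = 0 := by
            rw [List.countP_eq_zero]
            intro x hx; simp [hgrpk x hx, hkk]
          omega
        have hdrlen : dr.length ≤ n := by
          have h1 : grp.length + dr.length = rest.length + 1 := by
            have := congrArg List.length hsplit
            simpa using this
          have h2 : 1 ≤ grp.length := by
            cases hgC : grp with
            | nil => exact absurd hgC hgrpne
            | cons _ _ => simp
          simp only [List.length_cons] at hlen
          omega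
        have hib := ihn dr hdrlen hdrpair
        have hloLe : grp.countP (fun x => PySem.Chars.islower x) ≤ grp.length :=
          List.countP_le_length
        have hnotlow : grp.countP (fun x => !PySem.Chars.islower x)
            = grp.length - grp.countP (fun x => PySem.Chars.islower x) := by
          have := List.length_eq_countP_add_countP (fun x => PySem.Chars.islower x) (l := grp)
          simp only [decide_not, Bool.decide_eq_true] at this
          omega
        have htoNat : (((grp.length : Int) - (grp.countP (fun x => PySem.Chars.islower x) : Int)).toNat)
            = grp.length - grp.countP (fun x => PySem.Chars.islower x) := by omega
        have hflatcongr : (PySem.List.dedup (dr.map PySem.Chars.upperChar)).flatMap (hbBlock (c :: rest))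
            = (PySem.List.dedup (dr.map PySem.Chars.upperChar)).flatMap (hbBlock dr) := by
          simp only [List.flatMap_def]
          congr 1
          refine List.map_congr_left ?_
          intro k' hk'mem
          have : k' ∈ dr.map PySem.Chars.upperChar := (PySem.List.mem_dedup _ _).mp hk'mem
          obtain ⟨x, hx, rfl⟩ := List.mem_map.mp this
          have hkne : PySem.Chars.upperChar x ≠ k := hne x hx
          rw [hbBlock, hbBlock, hcountOtherHi _ hkne, hcountOtherLo _ hkne]
        rw [altEmit]
        simp only [← hk, ← hp, ← hgrp, hdrop, hib, hdedup, List.flatMap_cons, hflatcongr]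
        rw [hbBlock, hcountHi, hcountLo, hnotlow, List.append_assoc]
        congr 1
        · rw [PySem.List.pyRepeat_singleton, htoNat]
        · congr 1
          rw [PySem.List.pyRepeat_singleton]
          simp
  intro ss h
  exact main ss.length ss le_rfl h

theorem dedup_sublist {α : Type} [BEq α] [LawfulBEq α] (l : List α) :
    (PySem.List.dedup l).Sublist l := by
  simp only [PySem.List.dedup_eq_ofList]
  induction l with
  | nil => simp
  | cons x xs ih =>
      rw [PySem.Set.ofList_cons]
      have h1 : ((PySem.Set.ofList xs).discard x).Sublist (PySem.Set.ofList xs) := by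
        simp only [PySem.Set.discard]
        exact List.filter_sublist
      exact List.Sublist.cons₂ x (h1.trans ih)

theorem alt_eq_canon (s : String) : herd_the_babies_alt s = String.ofList (hbCanon s.toList) := by
  unfold herd_the_babies_alt hbCanon
  set cs := s.toList with hcs
  set ss := PySem.List.sorted cs (fun c => PySem.Chars.upperChar c) with hss
  have hpair : ss.Pairwise (fun a b => PySem.Chars.upperChar a ≤ PySem.Chars.upperChar b) :=
    PySem.List.sorted_pairwise cs _
  have hperm : ss.Perm cs := PySem.List.sorted_perm cs _ false
  rw [altEmit_sorted ss hpair]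
  congr 1
  have hmaps : (ss.map PySem.Chars.upperChar).Perm (cs.map PySem.Chars.upperChar) := hperm.map _
  have hsorted_eq : PySem.List.sorted (PySem.List.dedup (cs.map PySem.Chars.upperChar)) (fun x => x)
      = PySem.List.dedup (ss.map PySem.Chars.upperChar) := by
    refine PySem.List.sorted_eq_of_perm_of_pairwise_lt _ _ _ ?_ ?_
    · refine (List.perm_ext_iff_of_nodup ?_ ?_).mpr ?_
      · simpa using PySem.Set.nodup_ofList _
      · simpa using PySem.Set.nodup_ofList _
      · intro a
        rw [PySem.List.mem_dedup, PySem.List.mem_dedup]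
        exact hmaps.mem_iff
    · have h1 : (ss.map PySem.Chars.upperChar).Pairwise (· ≤ ·) := List.pairwise_map.mpr hpair
      have h2 : (PySem.List.dedup (ss.map PySem.Chars.upperChar)).Pairwise (· ≤ ·) :=
        h1.sublist (dedup_sublist _)
      have h3 : (PySem.List.dedup (ss.map PySem.Chars.upperChar)).Nodup := by
        simpa using PySem.Set.nodup_ofList _
      have h4 := h2.and h3
      exact h4.imp (fun hab => lt_of_le_of_ne hab.1 hab.2)
  rw [hsorted_eq]
  simp only [List.flatMap_def]
  congr 1
  refine List.map_congr_left ?_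
  intro k _
  rw [hbBlock, hbBlock, hbHi, hbHi, hbLo, hbLo, hperm.countP_eq, hperm.countP_eq]

-- ===== VERDICT (by name: the statement is the Claim_ definition above) =====
theorem herd_the_babies_spec : Claim_equal_herd_the_babies := by
  intro s _
  unfold Spec_herd_the_babies
  rw [herd_eq_canon, alt_eq_canon]
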